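-- pv_equiv track=rewrite | github.com/tanmayagarwal1/Code | Algorithms/ThousandLines.py | TrainTix
-- ===== SOURCE A (Python) =====
-- def TrainTix(days, cost):
-- 	dp = [-1 for _ in range(366)]
-- 	dp[0] = 0
-- 	for day in days:
-- 		dp[day] = 0
-- 	for i in range(1, 366):
-- 		if dp[i] == -1:
-- 			dp[i] = dp[i- 1]
-- 		else:
-- 			dp[i] = min(dp[i -1] + cost[0], dp[max(i - 7, 0)] + cost[1], dp[max(i - 30, 0)] + cost[2])
-- 	return dp[365]
-- ===== SOURCE B (Python) =====
-- def TrainTix(days, cost):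
--     travel = set(days)
--     memo = {}
--     def solve(i):
--         if i <= 0:
--             return 0
--         if i in memo:
--             return memo[i]
--         if i not in travel:
--             v = solve(i - 1)
--         else:
--             v = min(solve(i - 1) + cost[0], solve(i - 7) + cost[1], solve(i - 30) + cost[2])
--         memo[i] = v
--         return v
--     return solve(365)
-- ===== Notes on version B (the rewrite author's own statement) =====
-- stated objective: alternative
-- what changed: Replaces the forward 366-slot DP array (sentinel -1 marking plus carry-forward fill) with a top-down memoized recursion solve(i) over a set of travel days, recursing from day 365 with a dict cache.
-- outside the precondition, e.g. on TrainTix([-1], [1, 2, 3]): A returns 1, B returns 0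
import Mathlib
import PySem

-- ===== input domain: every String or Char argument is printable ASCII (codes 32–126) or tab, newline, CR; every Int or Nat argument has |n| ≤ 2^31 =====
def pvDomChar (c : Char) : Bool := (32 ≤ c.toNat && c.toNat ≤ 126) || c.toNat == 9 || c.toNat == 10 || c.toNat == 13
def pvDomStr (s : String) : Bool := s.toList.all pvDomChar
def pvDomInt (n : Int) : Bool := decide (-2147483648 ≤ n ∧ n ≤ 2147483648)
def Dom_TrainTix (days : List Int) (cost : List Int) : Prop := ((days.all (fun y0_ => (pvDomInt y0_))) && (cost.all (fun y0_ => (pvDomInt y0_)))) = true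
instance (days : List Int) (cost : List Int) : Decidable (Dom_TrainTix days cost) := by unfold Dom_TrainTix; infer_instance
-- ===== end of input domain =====

-- B replaces A's forward 366-slot DP array (sentinel -1 marking + carry-forward fill) by a
-- top-down memoized recursion over a set of travel days; same cost, different decomposition.

-- ===== PORT A =====
-- literal transliteration of A: dp list of 366 slots, -1 sentinel, marking pass, forward fill
def TrainTix (days : List Int) (cost : List Int) : Int :=
  let dp0 := PySem.List.pySetD (List.replicate 366 (-1 : Int)) 0 0          -- dp = [-1]*366; dp[0] = 0
  let dp1 := days.foldl (fun dp day => PySem.List.pySetD dp day 0) dp0      -- for day in days: dp[day] = 0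
  let dp2 := (PySem.List.pyRange 1 366 1).foldl (fun dp i =>                -- for i in range(1, 366):
    if PySem.List.pyGetD dp i (-1) == -1 then
      PySem.List.pySetD dp i (PySem.List.pyGetD dp (i - 1) (-1))
    else
      PySem.List.pySetD dp i
        (min (min (PySem.List.pyGetD dp (i - 1) (-1) + PySem.List.pyGetD cost 0 0)
                  (PySem.List.pyGetD dp (max (i - 7) 0) (-1) + PySem.List.pyGetD cost 1 0))
             (PySem.List.pyGetD dp (max (i - 30) 0) (-1) + PySem.List.pyGetD cost 2 0))) dp1
  PySem.List.pyGetD dp2 365 (-1)                                            -- return dp[365]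

-- ===== PORT B =====
-- literal transliteration of B's solve(i): memo dict threaded through the recursion;
-- fuel is only a structural totality device (every call keeps i ≤ fuel, so fuel never runs out:
-- at fuel = 0 we have i ≤ 0, Python's first branch)
def solveB (travel : PySem.Set Int) (cost : List Int) :
    Nat → Int → PySem.Dict Int Int → Int × PySem.Dict Int Int
  | 0, _, memo => (0, memo)
  | fuel + 1, i, memo =>
    if i ≤ 0 then (0, memo)
    else
      match PySem.Dict.get? memo i with
      | some v => (v, memo)
      | none =>
        if ¬ PySem.Set.contains travel i then
          let r := solveB travel cost fuel (i - 1) memo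
          (r.1, PySem.Dict.insert r.2 i r.1)
        else
          let r1 := solveB travel cost fuel (i - 1) memo
          let r7 := solveB travel cost fuel (i - 7) r1.2
          let r30 := solveB travel cost fuel (i - 30) r7.2
          let v := min (min (r1.1 + PySem.List.pyGetD cost 0 0)
                            (r7.1 + PySem.List.pyGetD cost 1 0))
                       (r30.1 + PySem.List.pyGetD cost 2 0)
          (v, PySem.Dict.insert r30.2 i v)

def TrainTix_alt (days : List Int) (cost : List Int) : Int :=
  (solveB (PySem.Set.ofList days) cost 365 365 PySem.Dict.empty).1

-- ===== PRECONDITION & SPEC =====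
-- Pre_ excludes (a) day values above 365 or below -366 and travel days with fewer than 3 costs,
-- where A raises IndexError, and (b) day values in -366..-1, on which A still returns: Python's
-- negative list index silently marks the wrapped calendar day 366+d as a travel day — an artefact
-- of A's dp-list indexing that a day-set implementation has no reason to reproduce.
def Pre_TrainTix (days : List Int) (cost : List Int) : Prop :=
  (∀ d ∈ days, 0 ≤ d ∧ d ≤ 365) ∧ ((∃ d ∈ days, 1 ≤ d) → 3 ≤ cost.length)
instance (days : List Int) (cost : List Int) : Decidable (Pre_TrainTix days cost) := by
  unfold Pre_TrainTix; infer_instance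
def pvWitness_TrainTix : List Int × List Int := ([1, 4, 6, 7, 8, 20, 365], [2, 7, 15])

def Spec_TrainTix (days : List Int) (cost : List Int) (out : Int) : Prop := out = TrainTix_alt days cost
instance (days : List Int) (cost : List Int) (out : Int) : Decidable (Spec_TrainTix days cost out) := by unfold Spec_TrainTix; infer_instance

-- ===== CLAIM (what is proved, stated in full; the proofs are below) =====
def Claim_equal_TrainTix : Prop := ∀ (days : List Int) (cost : List Int), Dom_TrainTix days cost → Pre_TrainTix days cost → Spec_TrainTix days cost (TrainTix days cost)

-- ===== LEMMAS AND PROOFS =====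

-- the common mathematical recurrence both programs compute
def recf (days : List Int) (cost : List Int) : Nat → Int
  | 0 => 0
  | n + 1 =>
    if ((n : Int) + 1) ∈ days then
      min (min (recf days cost n + PySem.List.pyGetD cost 0 0)
               (recf days cost (n + 1 - 7) + PySem.List.pyGetD cost 1 0))
          (recf days cost (n + 1 - 30) + PySem.List.pyGetD cost 2 0)
    else recf days cost n
decreasing_by all_goals omega

theorem recf_step (days cost : List Int) (i : Int) (hi : 1 ≤ i) :
    recf days cost i.toNat =
      if i ∈ days then
        min (min (recf days cost (i - 1).toNat + PySem.List.pyGetD cost 0 0)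
                 (recf days cost (i - 7).toNat + PySem.List.pyGetD cost 1 0))
            (recf days cost (i - 30).toNat + PySem.List.pyGetD cost 2 0)
      else recf days cost (i - 1).toNat := by
  obtain ⟨n, hn⟩ : ∃ n, i.toNat = n + 1 := ⟨i.toNat - 1, by omega⟩
  rw [hn, recf]
  have h1 : ((n : Int) + 1) = i := by omega
  have h2 : (i - 1).toNat = n := by omega
  have h7 : n + 1 - 7 = (i - 7).toNat := by omega
  have h30 : n + 1 - 30 = (i - 30).toNat := by omega
  rw [h1, h2, h7, h30]

theorem solveB_spec (days cost : List Int) (fuel : Nat) : ∀ (i : Int), i ≤ fuel →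
    ∀ (memo : PySem.Dict Int Int),
    (∀ k v, PySem.Dict.get? memo k = some v → v = recf days cost k.toNat) →
    (solveB (PySem.Set.ofList days) cost fuel i memo).1 = recf days cost i.toNat ∧
    (∀ k v, PySem.Dict.get? (solveB (PySem.Set.ofList days) cost fuel i memo).2 k = some v →
      v = recf days cost k.toNat) := by
  induction fuel with
  | zero =>
    intro i hi memo hm
    have h0 : i.toNat = 0 := by omega
    rw [solveB, h0, recf]
    exact ⟨rfl, hm⟩
  | succ fuel ih =>
    intro i hi memo hm
    by_cases h0 : i ≤ 0
    · have h0' : i.toNat = 0 := by omega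
      rw [solveB, if_pos h0, h0', recf]
      exact ⟨rfl, hm⟩
    · rw [solveB, if_neg h0]
      cases hg : PySem.Dict.get? memo i with
      | some v => exact ⟨hm i v hg, hm⟩
      | none =>
        have hi1 : (1 : Int) ≤ i := by omega
        dsimp only
        by_cases hmem : i ∈ days
        · have hc : PySem.Set.contains (PySem.Set.ofList days) i = true := by
            exact (PySem.Set.contains_iff _ _).2 ((PySem.Set.mem_ofList _ _).2 hmem)
          obtain ⟨hv1, hm1⟩ := ih (i - 1) (by omega) memo hm
          obtain ⟨hv7, hm7⟩ := ih (i - 7) (by omega) _ hm1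
          obtain ⟨hv30, hm30⟩ := ih (i - 30) (by omega) _ hm7
          rw [if_neg (show ¬¬(PySem.Set.contains (PySem.Set.ofList days) i = true) by simp; exact hmem)]
          rw [recf_step days cost i hi1, if_pos hmem]
          refine ⟨by rw [hv1, hv7, hv30], ?_⟩
          intro k v hk
          rw [PySem.Dict.get?_insert] at hk
          split at hk
          · next hki =>
            cases hk
            rw [hki, recf_step days cost i hi1, if_pos hmem, hv1, hv7, hv30]
          · exact hm30 k v hk
        · have hc : PySem.Set.contains (PySem.Set.ofList days) i = false := by
            rw [Bool.eq_false_iff]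
            intro h
            exact hmem ((PySem.Set.mem_ofList _ _).1 ((PySem.Set.contains_iff _ _).1 h))
          obtain ⟨hv1, hm1⟩ := ih (i - 1) (by omega) memo hm
          rw [if_pos (show ¬(PySem.Set.contains (PySem.Set.ofList days) i = true) by simp; exact hmem)]
          rw [recf_step days cost i hi1, if_neg hmem]
          refine ⟨hv1, ?_⟩
          intro k v hk
          rw [PySem.Dict.get?_insert] at hk
          split at hk
          · next hki =>
            cases hk
            rw [hki, recf_step days cost i hi1, if_neg hmem, hv1]
          · exact hm1 k v hk

theorem mark_char (days : List Int) (hd : ∀ d ∈ days, 0 ≤ d ∧ d ≤ 365)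
    (dp : List Int) (hlen : dp.length = 366) :
    (days.foldl (fun dp day => PySem.List.pySetD dp day 0) dp).length = 366 ∧
    ∀ j : Nat, PySem.List.pyGetD (days.foldl (fun dp day => PySem.List.pySetD dp day 0) dp) (j : Int) (-1)
      = if (j : Int) ∈ days then 0 else PySem.List.pyGetD dp (j : Int) (-1) := by
  induction days generalizing dp with
  | nil => exact ⟨hlen, fun j => by simp⟩
  | cons d ds ih =>
    have hd0 : 0 ≤ d ∧ d ≤ 365 := hd d (by simp)
    have hds : ∀ x ∈ ds, 0 ≤ x ∧ x ≤ 365 := fun x hx => hd x (List.mem_cons_of_mem _ hx)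
    have hlen' : (PySem.List.pySetD dp d 0).length = 366 := by
      rw [PySem.List.length_pySetD]; exact hlen
    obtain ⟨L, H⟩ := ih hds (PySem.List.pySetD dp d 0) hlen'
    refine ⟨by simpa using L, ?_⟩
    intro j
    rw [List.foldl_cons, H j]
    have hdc : (d : Int) = ((d.toNat : Nat) : Int) := by omega
    by_cases hj : (j : Int) ∈ ds
    · rw [if_pos hj, if_pos (List.mem_cons_of_mem _ hj)]
    · rw [if_neg hj, hdc,
        PySem.List.pyGetD_pySetD_natCast dp d.toNat j 0 (-1) (by omega)]
      by_cases hjd : j = d.toNat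
      · rw [if_pos hjd, if_pos (by rw [List.mem_cons]; left; omega)]
      · rw [if_neg hjd, if_neg (by
          rw [List.mem_cons]
          rintro (h | h)
          · omega
          · exact hj h)]

-- A's loop body, named for the proofs (definitionally the lambda inside TrainTix)
def stepA (cost : List Int) (dp : List Int) (i : Int) : List Int :=
  if PySem.List.pyGetD dp i (-1) == -1 then
    PySem.List.pySetD dp i (PySem.List.pyGetD dp (i - 1) (-1))
  else
    PySem.List.pySetD dp i
      (min (min (PySem.List.pyGetD dp (i - 1) (-1) + PySem.List.pyGetD cost 0 0)
                (PySem.List.pyGetD dp (max (i - 7) 0) (-1) + PySem.List.pyGetD cost 1 0))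
           (PySem.List.pyGetD dp (max (i - 30) 0) (-1) + PySem.List.pyGetD cost 2 0))

theorem loop_char (days cost : List Int)
    (dp : List Int) (hlen : dp.length = 366)
    (hmark : ∀ j : Nat, j < 366 →
      PySem.List.pyGetD dp (j : Int) (-1) = if j = 0 ∨ (j : Int) ∈ days then 0 else -1)
    (m : Nat) (hm : m ≤ 365) :
    ((PySem.List.pyRange 1 ((m : Int) + 1) 1).foldl (stepA cost) dp).length = 366 ∧
      ∀ j : Nat, j < 366 →
        PySem.List.pyGetD ((PySem.List.pyRange 1 ((m : Int) + 1) 1).foldl (stepA cost) dp) (j : Int) (-1)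
        = if j ≤ m then recf days cost j
          else (if j = 0 ∨ (j : Int) ∈ days then 0 else -1) := by
  induction m with
  | zero =>
    rw [show ((0 : Nat) : Int) + 1 = 1 by ring, PySem.List.pyRange_one_eq_nil le_rfl,
      List.foldl_nil]
    refine ⟨hlen, fun j hj => ?_⟩
    rw [hmark j hj]
    by_cases hj0 : j ≤ 0
    · have : j = 0 := by omega
      subst this
      rw [if_pos le_rfl, if_pos (Or.inl rfl), recf]
    · rw [if_neg hj0]
  | succ m ih =>
    obtain ⟨L, H⟩ := ih (by omega)
    rw [show ((m + 1 : Nat) : Int) + 1 = ((m : Int) + 1) + 1 by push_cast; ring,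
      PySem.List.pyRange_one_succ_right (by omega), List.foldl_append, List.foldl_cons,
      List.foldl_nil]
    set dpm := (PySem.List.pyRange 1 ((m : Int) + 1) 1).foldl (stepA cost) dp with hdpm
    have hcast : ((m : Int) + 1) = ((m + 1 : Nat) : Int) := by push_cast; ring
    have hscrut : PySem.List.pyGetD dpm ((m : Int) + 1) (-1)
        = if ((m + 1 : Nat) : Int) ∈ days then 0 else -1 := by
      rw [hcast, H (m + 1) (by omega), if_neg (by omega)]
      simp
    -- the three read indices, as Nat casts of values ≤ m
    have e1 : ((m : Int) + 1) - 1 = ((m : Nat) : Int) := by ring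
    have e7 : max (((m : Int) + 1) - 7) 0 = ((m + 1 - 7 : Nat) : Int) := by
      omega
    have e30 : max (((m : Int) + 1) - 30) 0 = ((m + 1 - 30 : Nat) : Int) := by
      omega
    have hv1 : PySem.List.pyGetD dpm (((m : Int) + 1) - 1) (-1) = recf days cost m := by
      rw [e1, H m (by omega), if_pos le_rfl]
    have hv7 : PySem.List.pyGetD dpm (max (((m : Int) + 1) - 7) 0) (-1)
        = recf days cost (m + 1 - 7) := by
      rw [e7, H (m + 1 - 7) (by omega), if_pos (by omega)]
    have hv30 : PySem.List.pyGetD dpm (max (((m : Int) + 1) - 30) 0) (-1)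
        = recf days cost (m + 1 - 30) := by
      rw [e30, H (m + 1 - 30) (by omega), if_pos (by omega)]
    have hrec : recf days cost (m + 1)
        = if ((m + 1 : Nat) : Int) ∈ days then
            min (min (recf days cost m + PySem.List.pyGetD cost 0 0)
                     (recf days cost (m + 1 - 7) + PySem.List.pyGetD cost 1 0))
                (recf days cost (m + 1 - 30) + PySem.List.pyGetD cost 2 0)
          else recf days cost m := by
      rw [recf, ← hcast]
    by_cases hmem : ((m + 1 : Nat) : Int) ∈ days
    · have hstep : stepA cost dpm ((m : Int) + 1)
          = PySem.List.pySetD dpm ((m : Int) + 1) (recf days cost (m + 1)) := by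
        rw [stepA, hscrut, if_pos hmem, if_neg (by decide), hv1, hv7, hv30,
          hrec, if_pos hmem]
      rw [hstep]
      refine ⟨by rw [PySem.List.length_pySetD]; exact L, fun j hj => ?_⟩
      rw [hcast, PySem.List.pyGetD_pySetD_natCast dpm (m + 1) j _ (-1) (by omega)]
      by_cases hjm : j = m + 1
      · rw [if_pos hjm, hjm, if_pos (show m + 1 ≤ m + 1 from le_rfl)]
      · rw [if_neg hjm, H j hj]
        by_cases hle : j ≤ m
        · rw [if_pos hle, if_pos (show j ≤ m + 1 by omega)]
        · rw [if_neg hle, if_neg (show ¬j ≤ m + 1 by omega)]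
    · have hstep : stepA cost dpm ((m : Int) + 1)
          = PySem.List.pySetD dpm ((m : Int) + 1) (recf days cost (m + 1)) := by
        rw [stepA, hscrut, if_neg hmem, if_pos (by decide), hv1,
          hrec, if_neg hmem]
      rw [hstep]
      refine ⟨by rw [PySem.List.length_pySetD]; exact L, fun j hj => ?_⟩
      rw [hcast, PySem.List.pyGetD_pySetD_natCast dpm (m + 1) j _ (-1) (by omega)]
      by_cases hjm : j = m + 1
      · rw [if_pos hjm, hjm, if_pos (show m + 1 ≤ m + 1 from le_rfl)]
      · rw [if_neg hjm, H j hj]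
        by_cases hle : j ≤ m
        · rw [if_pos hle, if_pos (show j ≤ m + 1 by omega)]
        · rw [if_neg hle, if_neg (show ¬j ≤ m + 1 by omega)]

-- ===== VERDICT (by name: the statement is the Claim_ definition above) =====
set_option maxRecDepth 4096 in
theorem init_char (j : Nat) :
    PySem.List.pyGetD (PySem.List.pySetD (List.replicate 366 (-1 : Int)) 0 0) (j : Int) (-1)
      = if j = 0 then 0 else -1 := by
  have hset : PySem.List.pySetD (List.replicate 366 (-1 : Int)) 0 0
      = (0 : Int) :: List.replicate 365 (-1 : Int) := by
    rw [PySem.List.pySetD_of_nonneg _ 0 (by norm_num)]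
    rfl
  rw [hset, PySem.List.pyGetD_natCast]
  cases j with
  | zero => simp
  | succ k =>
    simp only [List.getD, List.getElem?_cons_succ, List.getElem?_replicate]
    split_ifs <;> simp_all

theorem TrainTix_spec : Claim_equal_TrainTix := by
  intro days cost _ hpre
  unfold Spec_TrainTix
  obtain ⟨hd, _⟩ := hpre
  -- B's side computes recf 365
  have hB : TrainTix_alt days cost = recf days cost 365 := by
    obtain ⟨h1, _⟩ := solveB_spec days cost 365 365 (by norm_num) PySem.Dict.empty
      (fun k v hk => by rw [PySem.Dict.get?_empty] at hk; cases hk)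
    rw [TrainTix_alt, h1, show Int.toNat 365 = 365 from rfl]
  -- A's side computes recf 365
  have init_len : (PySem.List.pySetD (List.replicate 366 (-1 : Int)) 0 0).length = 366 := by
    rw [PySem.List.length_pySetD, List.length_replicate]
  obtain ⟨L1, H1⟩ := mark_char days hd _ init_len
  have hmark : ∀ j : Nat, j < 366 →
      PySem.List.pyGetD (days.foldl (fun dp day => PySem.List.pySetD dp day 0)
        (PySem.List.pySetD (List.replicate 366 (-1 : Int)) 0 0)) (j : Int) (-1)
      = if j = 0 ∨ (j : Int) ∈ days then 0 else -1 := by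
    intro j _
    rw [H1 j, init_char j]
    by_cases hmem : (j : Int) ∈ days
    · rw [if_pos hmem, if_pos (Or.inr hmem)]
    · rw [if_neg hmem]
      by_cases hj0 : j = 0
      · rw [if_pos hj0, if_pos (Or.inl hj0)]
      · rw [if_neg hj0, if_neg (by rintro (h | h); exact hj0 h; exact hmem h)]
  obtain ⟨L2, H2⟩ := loop_char days cost _ L1 hmark 365 le_rfl
  rw [show ((365 : Nat) : Int) + 1 = 366 by norm_num] at H2
  have h365 := H2 365 (by omega)
  rw [if_pos le_rfl, show ((365 : Nat) : Int) = (365 : Int) by norm_num] at h365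
  rw [TrainTix, hB]
  exact h365
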